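-- pv_equiv track=rewrite | github.com/terramine21/bomGener | app/services/gen_exel.py | shorten_ranges
-- ===== SOURCE A (Python) =====
-- def split_item(item):
--     """Разделяет префикс и числовую часть: R12 -> ('R', 12)."""
--     if not item:
--         return None, None
--
--     prefix = ''
--     num_str = ''
--     for char in item:
--         if char.isalpha():
--             prefix += char
--         elif char.isdigit():
--             num_str += char
--
--     num = int(num_str) if num_str else None
--     return prefix, num
--
-- def shorten_ranges(s):
--     """
--     Сокращает список компонентов с одинаковым префиксом в диапазоны.
--     Пример:
--         "R1, R2, R3, R5" -> "R1-R3, R5"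
--     """
--     if not s:
--         return ""
--
--     items = [item.strip() for item in s.split(",")]
--     if not items:
--         return ""
--
--     has_numbers = any(split_item(item)[1] is not None for item in items)
--     if not has_numbers:
--         return s
--
--     valid_items = []
--     for item in items:
--         prefix, num = split_item(item)
--         if num is not None:
--             valid_items.append((prefix, num))
--
--     if not valid_items:
--         return ""
--
--     prefix = valid_items[0][0]
--     numbers = [num for _, num in valid_items]
--     numbers.sort()
--
--     ranges = []
--     start = numbers[0]
--     prev = start
--
--     for num in numbers[1:]:
--         if num == prev + 1:
--             prev = num
--         else:
--             if start == prev: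
--                 ranges.append(f"{prefix}{start}")
--             else:
--                 ranges.append(f"{prefix}{start}-{prefix}{prev}")
--             start = num
--             prev = num
--
--     if start == prev:
--         ranges.append(f"{prefix}{start}")
--     else:
--         ranges.append(f"{prefix}{start}-{prefix}{prev}")
--
--     return ", ".join(ranges)
-- ===== SOURCE B (Python) =====
-- def shorten_ranges(s):
--     # Parse every comma-separated token into (alpha-prefix, digit-string).
--     parsed = []
--     for token in s.split(","):
--         t = token.strip()
--         parsed.append((''.join(c for c in t if c.isalpha()),
--                        ''.join(c for c in t if c.isdigit())))
--     valid = [(p, int(d)) for p, d in parsed if d]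
--     if not valid:
--         return s
--     prefix = valid[0][0]
--     numbers = sorted(n for _, n in valid)
--     # First pass: build the consecutive runs as (lo, hi) pairs.
--     runs = []
--     rest = numbers
--     while rest:
--         lo = hi = rest[0]
--         rest = rest[1:]
--         while rest and rest[0] == hi + 1:
--             hi = rest[0]
--             rest = rest[1:]
--         runs.append((lo, hi))
--     # Second pass: render each run.
--     parts = [f"{prefix}{a}" if a == b else f"{prefix}{a}-{prefix}{b}"
--              for a, b in runs]
--     return ", ".join(parts)
-- ===== Notes on version B (the rewrite author's own statement) =====
-- stated objective: alternative
-- what changed: A threads start/prev state through one loop that emits formatted range strings as it goes; B first parses tokens with filter comprehensions, then builds the consecutive runs as a list of (lo, hi) pairs with a run-consuming nested loop, and renders them in a separate second pass.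
import Mathlib
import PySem

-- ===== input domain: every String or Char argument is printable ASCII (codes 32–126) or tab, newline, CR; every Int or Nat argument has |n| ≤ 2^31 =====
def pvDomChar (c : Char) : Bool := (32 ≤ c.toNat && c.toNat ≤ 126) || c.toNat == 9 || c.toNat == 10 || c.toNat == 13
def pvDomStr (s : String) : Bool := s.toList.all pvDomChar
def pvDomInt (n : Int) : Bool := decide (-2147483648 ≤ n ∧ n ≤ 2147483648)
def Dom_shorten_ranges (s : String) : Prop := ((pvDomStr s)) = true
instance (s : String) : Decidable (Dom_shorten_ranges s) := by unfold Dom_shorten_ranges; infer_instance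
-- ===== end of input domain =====

-- B replaces A's single pass that threads start/prev state through one loop by a two-pass
-- decomposition: first collect the consecutive runs as (lo, hi) pairs, then render them (objective: alternative).

-- shared formatting helper: the f-string block both Pythons contain
-- (f"{prefix}{a}" if a == b else f"{prefix}{a}-{prefix}{b}")
def fmtRange (ps : List Char) (a b : Int) : List Char :=
  if a == b then ps ++ PySem.Int.toChars a
  else ps ++ PySem.Int.toChars a ++ ['-'] ++ ps ++ PySem.Int.toChars b

-- ===== PORT A =====
-- split_item: one char loop accumulating the alpha prefix and the digit string
def splitItemA (item : List Char) : Option (List Char) × Option Int :=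
  if item = [] then (none, none)
  else
    let pd := item.foldl (fun (acc : List Char × List Char) c =>
      if PySem.Chars.isalpha c then (acc.1 ++ [c], acc.2)
      else if PySem.Chars.isdigit c then (acc.1, acc.2 ++ [c])
      else acc) ([], [])
    (some pd.1, if pd.2 = [] then none else PySem.Int.ofChars? pd.2)

-- the body of A's range loop (state: ranges so far, start, prev)
def stepA (ps : List Char) (acc : List (List Char) × Int × Int) (num : Int) :
    List (List Char) × Int × Int :=
  if num == acc.2.2 + 1 then (acc.1, acc.2.1, num)
  else (acc.1 ++ [fmtRange ps acc.2.1 acc.2.2], num, num)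

def shorten_ranges (s : String) : String :=
  if s.toList = [] then ""
  else
    let items := (PySem.Chars.splitOn s.toList [',']).map PySem.Chars.strip
    if items = [] then ""
    else if !(items.any fun it => (splitItemA it).2.isSome) then s
    else
      let valid := items.foldl (fun acc it =>
        match splitItemA it with
        | (p, some n) => acc ++ [(p, n)]
        | (_, none) => acc) ([] : List (Option (List Char) × Int))
      match valid with
      | [] => ""
      | (p0, _) :: _ =>
        -- the f-string would render a None prefix as "None" (unreachable: valid items are nonempty)
        let ps : List Char := match p0 with | some l => l | none => ['N', 'o', 'n', 'e']
        let numbers := PySem.List.sorted (valid.map (·.2)) (fun x => x) false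
        match numbers with
        | [] => ""  -- totality guard only: numbers is nonempty whenever valid is
        | h :: t =>
          let r := t.foldl (stepA ps) ([], h, h)
          String.ofList (PySem.Chars.join [',', ' '] (r.1 ++ [fmtRange ps r.2.1 r.2.2]))

-- ===== PORT B =====
-- inner while loop of Source B: consume the rest of one consecutive run, return (hi, rest)
def takeRunB (hi : Int) : List Int → Int × List Int
  | [] => (hi, [])
  | x :: rest => if x == hi + 1 then takeRunB x rest else (hi, x :: rest)

-- needed by runsOfB's termination proof
theorem takeRunB_len (hi : Int) (l : List Int) : (takeRunB hi l).2.length ≤ l.length := by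
  induction l generalizing hi with
  | nil => simp [takeRunB]
  | cons x rest ih =>
    simp only [takeRunB]
    split
    · exact Nat.le_succ_of_le (ih x)
    · simp

-- outer while loop of Source B: the list of (lo, hi) runs
def runsOfB (l : List Int) : List (Int × Int) :=
  match l with
  | [] => []
  | lo :: rest => (lo, (takeRunB lo rest).1) :: runsOfB (takeRunB lo rest).2
termination_by l.length
decreasing_by
  exact Nat.lt_succ_of_le (takeRunB_len lo rest)

def shorten_ranges_alt (s : String) : String :=
  let parsed := (PySem.Chars.splitOn s.toList [',']).map (fun tok =>
    let t := PySem.Chars.strip tok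
    (t.filter PySem.Chars.isalpha, t.filter PySem.Chars.isdigit))
  -- int(d) on a nonempty digit string never raises, so ofChars? is some here
  let valid := (parsed.filter (fun pd => pd.2 ≠ [])).filterMap
    (fun pd => (PySem.Int.ofChars? pd.2).map (fun n => (pd.1, n)))
  match valid with
  | [] => s
  | (p0, _) :: _ =>
    let numbers := PySem.List.sorted (valid.map (·.2)) (fun x => x) false
    String.ofList (PySem.Chars.join [',', ' ']
      ((runsOfB numbers).map (fun ab => fmtRange p0 ab.1 ab.2)))

-- ===== PRECONDITION & SPEC =====
def Spec_shorten_ranges (s : String) (out : String) : Prop := out = shorten_ranges_alt s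
instance (s : String) (out : String) : Decidable (Spec_shorten_ranges s out) := by unfold Spec_shorten_ranges; infer_instance

-- ===== CLAIM (what is proved, stated in full; the proofs are below) =====
def Claim_equal_shorten_ranges : Prop := ∀ (s : String), Dom_shorten_ranges s → Spec_shorten_ranges s (shorten_ranges s)

-- ===== LEMMAS AND PROOFS =====

theorem isdigit_of_isalpha (c : Char) (h : PySem.Chars.isalpha c = true) :
    PySem.Chars.isdigit c = false := by
  simp only [PySem.Chars.isalpha, PySem.Chars.isdigit, PySem.Chars.isupper, PySem.Chars.islower,
    Bool.or_eq_true, Bool.and_eq_true, decide_eq_true_eq, Bool.and_eq_false_iff,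
    decide_eq_false_iff_not, Char.le_def, UInt32.le_iff_toNat_le] at *
  have h0 : '0'.val.toNat = 48 := rfl
  have h9 : '9'.val.toNat = 57 := rfl
  have hA : 'A'.val.toNat = 65 := rfl
  have hZ : 'Z'.val.toNat = 90 := rfl
  have ha : 'a'.val.toNat = 97 := rfl
  have hz : 'z'.val.toNat = 122 := rfl
  omega

theorem parseFold (cs : List Char) (p d : List Char) :
    cs.foldl (fun (acc : List Char × List Char) c =>
      if PySem.Chars.isalpha c then (acc.1 ++ [c], acc.2)
      else if PySem.Chars.isdigit c then (acc.1, acc.2 ++ [c])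
      else acc) (p, d)
    = (p ++ cs.filter PySem.Chars.isalpha, d ++ cs.filter PySem.Chars.isdigit) := by
  induction cs generalizing p d with
  | nil => simp
  | cons c rest ih =>
    by_cases ha : PySem.Chars.isalpha c = true
    · simp [ha, isdigit_of_isalpha c ha, ih]
    · by_cases hd : PySem.Chars.isdigit c = true
      · simp [ha, hd, ih]
      · simp [ha, hd, ih]

theorem splitItemA_eq (it : List Char) :
    splitItemA it =
      ((if it = [] then none else some (it.filter PySem.Chars.isalpha)),
       (if it.filter PySem.Chars.isdigit = [] then none
        else PySem.Int.ofChars? (it.filter PySem.Chars.isdigit))) := by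
  by_cases h : it = []
  · subst h; simp [splitItemA]
  · simp only [splitItemA, h, if_false]
    rw [parseFold]
    simp

-- B's valid list, expressed over the stripped items (A's items)
def pairOf (it : List Char) : List Char × List Char :=
  (it.filter PySem.Chars.isalpha, it.filter PySem.Chars.isdigit)

def bValid (items : List (List Char)) : List (List Char × Int) :=
  ((items.map pairOf).filter (fun pd => pd.2 ≠ [])).filterMap
    (fun pd => (PySem.Int.ofChars? pd.2).map (fun n => (pd.1, n)))

theorem validRel (items : List (List Char)) (acc : List (Option (List Char) × Int)) :
    items.foldl (fun acc it =>
        match splitItemA it with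
        | (p, some n) => acc ++ [(p, n)]
        | (_, none) => acc) acc
    = acc ++ (bValid items).map (fun pv => (some pv.1, pv.2)) := by
  induction items generalizing acc with
  | nil => simp [bValid]
  | cons it rest ih =>
    rw [List.foldl_cons, ih]
    by_cases hnil : it = []
    · subst hnil
      simp [splitItemA_eq, bValid, pairOf]
    · rw [splitItemA_eq]
      by_cases hd : it.filter PySem.Chars.isdigit = []
      · simp [bValid, pairOf, hnil, hd]
      · cases hoc : PySem.Int.ofChars? (it.filter PySem.Chars.isdigit) with
        | none => simp [bValid, pairOf, hnil, hd, hoc]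
        | some n => simp [bValid, pairOf, hnil, hd, hoc]

theorem anyIff (items : List (List Char)) :
    (items.any fun it => (splitItemA it).2.isSome) = true ↔ bValid items ≠ [] := by
  induction items with
  | nil => simp [bValid]
  | cons it rest ih =>
    have hsnd := congrArg Prod.snd (splitItemA_eq it)
    by_cases hd : it.filter PySem.Chars.isdigit = []
    · have hf : (splitItemA it).2.isSome = false := by rw [hsnd]; simp [hd]
      have hb : bValid (it :: rest) = bValid rest := by simp [bValid, pairOf, hd]
      rw [List.any_cons, hb]
      simp only [hf, Bool.false_or]
      exact ih
    · cases hoc : PySem.Int.ofChars? (it.filter PySem.Chars.isdigit) with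
      | none =>
        have hf : (splitItemA it).2.isSome = false := by rw [hsnd]; simp [hd, hoc]
        have hb : bValid (it :: rest) = bValid rest := by simp [bValid, pairOf, hd, hoc]
        rw [List.any_cons, hb]
        simp only [hf, Bool.false_or]
        exact ih
      | some n =>
        have hf : (splitItemA it).2.isSome = true := by rw [hsnd]; simp [hd, hoc]
        have hb : bValid (it :: rest) = (it.filter PySem.Chars.isalpha, n) :: bValid rest := by
          simp [bValid, pairOf, hd, hoc]
        rw [List.any_cons, hb]
        simp [hf]

theorem splitOn_go_ne_nil (sep : List Char) (fuel : Nat) :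
    ∀ (l cur : List Char) (acc : List (List Char)),
      PySem.Chars.splitOn.go sep fuel l cur acc ≠ [] := by
  induction fuel with
  | zero => intro l cur acc; simp [PySem.Chars.splitOn.go]
  | succ f ih =>
    intro l cur acc
    cases l with
    | nil => simp [PySem.Chars.splitOn.go]
    | cons c rest =>
      rw [PySem.Chars.splitOn.go]
      split
      · exact ih _ _ _
      · exact ih _ _ _

theorem splitOn_ne_nil (cs sep : List Char) : PySem.Chars.splitOn cs sep ≠ [] := by
  unfold PySem.Chars.splitOn
  exact splitOn_go_ne_nil sep _ cs [] []

-- A's collapse loop (threading start/prev) computes exactly B's runs, rendered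
theorem loopA_eq (ps : List Char) (t : List Int) :
    ∀ (st pv : Int) (rs : List (List Char)),
      (t.foldl (stepA ps) (rs, st, pv)).1
        ++ [fmtRange ps (t.foldl (stepA ps) (rs, st, pv)).2.1
              (t.foldl (stepA ps) (rs, st, pv)).2.2]
      = rs ++ fmtRange ps st (takeRunB pv t).1
          :: ((runsOfB (takeRunB pv t).2).map (fun ab => fmtRange ps ab.1 ab.2)) := by
  induction t with
  | nil => intro st pv rs; simp [takeRunB, runsOfB]
  | cons x t ih =>
    intro st pv rs
    by_cases hx : x == pv + 1
    · have hs : stepA ps (rs, st, pv) x = (rs, st, x) := by simp [stepA, hx]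
      rw [List.foldl_cons, hs, ih]
      simp [takeRunB, hx]
    · have hs : stepA ps (rs, st, pv) x = (rs ++ [fmtRange ps st pv], x, x) := by
        simp only [stepA]
        simp [hx]
      rw [List.foldl_cons, hs, ih]
      have hr : runsOfB (x :: t) = (x, (takeRunB x t).1) :: runsOfB (takeRunB x t).2 := by
        rw [runsOfB]
      simp [takeRunB, hx, hr]

-- ===== VERDICT (by name: the statement is the Claim_ definition above) =====
theorem shorten_ranges_spec : Claim_equal_shorten_ranges := by
  intro s _
  unfold Spec_shorten_ranges
  by_cases hes : s.toList = []
  · have hb : shorten_ranges_alt s = s := by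
      unfold shorten_ranges_alt
      rw [hes]
      rfl
    have ha : shorten_ranges s = "" := by unfold shorten_ranges; rw [hes]; simp
    rw [ha, hb]
    exact (String.toList_eq_nil_iff.mp hes).symm
  · -- nonempty string
    set items := (PySem.Chars.splitOn s.toList [',']).map PySem.Chars.strip with hitems
    have hine : items ≠ [] := by
      simp only [hitems, ne_eq, List.map_eq_nil_iff]
      exact splitOn_ne_nil _ _
    -- B's valid list equals bValid items
    have hparsed : ((PySem.Chars.splitOn s.toList [',']).map (fun tok =>
        let t := PySem.Chars.strip tok
        (t.filter PySem.Chars.isalpha, t.filter PySem.Chars.isdigit))) = items.map pairOf := by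
      rw [hitems, List.map_map]; rfl
    cases hbv : bValid items with
    | nil =>
      -- no numbered item: both return s
      have hany : (items.any fun it => (splitItemA it).2.isSome) = false := by
        rw [← Bool.not_eq_true]
        intro h
        exact (anyIff items).mp h hbv
      have ha : shorten_ranges s = s := by
        unfold shorten_ranges
        rw [if_neg hes, ← hitems, if_neg hine, hany]
        simp
      have hbv' : (((items.map pairOf).filter (fun pd => pd.2 ≠ [])).filterMap
          (fun pd => (PySem.Int.ofChars? pd.2).map (fun n => (pd.1, n)))) = [] := hbv
      have hb : shorten_ranges_alt s = s := by
        unfold shorten_ranges_alt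
        rw [hparsed]
        simp only [hbv']
      rw [ha, hb]
    | cons q rest =>
      obtain ⟨q0, n0⟩ := q
      have hany : (items.any fun it => (splitItemA it).2.isSome) = true := by
        rw [anyIff, hbv]; simp
      have hvalid : items.foldl (fun acc it =>
          match splitItemA it with
          | (p, some n) => acc ++ [(p, n)]
          | (_, none) => acc) ([] : List (Option (List Char) × Int))
          = (some q0, n0) :: (rest.map (fun pv => (some pv.1, pv.2))) := by
        rw [validRel, hbv]
        simp
      have hbv' : (((items.map pairOf).filter (fun pd => pd.2 ≠ [])).filterMap
          (fun pd => (PySem.Int.ofChars? pd.2).map (fun n => (pd.1, n)))) = (q0, n0) :: rest := hbv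
      -- the two sorted key lists are the same
      have hnum : (((some q0, n0) :: (rest.map (fun pv => (some pv.1, pv.2)))).map
            (fun x : Option (List Char) × Int => x.2))
          = (((q0, n0) :: rest).map (fun x : List Char × Int => x.2)) := by
        simp
      cases hsort : PySem.List.sorted ((((q0, n0) :: rest).map (fun x : List Char × Int => x.2)))
          (fun x => x) false with
      | nil =>
        exact absurd ((PySem.List.sorted_eq_nil_iff _ _ _).mp hsort) (by simp)
      | cons h t =>
        have ha : shorten_ranges s = String.ofList (PySem.Chars.join [',', ' ']
            ((t.foldl (stepA q0) ([], h, h)).1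
              ++ [fmtRange q0 (t.foldl (stepA q0) ([], h, h)).2.1
                    (t.foldl (stepA q0) ([], h, h)).2.2])) := by
          unfold shorten_ranges
          rw [if_neg hes, ← hitems, if_neg hine, hany]
          simp only [Bool.not_true, Bool.false_eq_true, if_false, hvalid, hnum, hsort]
        have hb : shorten_ranges_alt s = String.ofList (PySem.Chars.join [',', ' ']
            ((runsOfB (h :: t)).map (fun ab => fmtRange q0 ab.1 ab.2))) := by
          unfold shorten_ranges_alt
          rw [hparsed]
          simp only [hbv', hsort]
        rw [ha, hb, loopA_eq q0 t h h []]
        rw [show runsOfB (h :: t) = (h, (takeRunB h t).1) :: runsOfB (takeRunB h t).2 from by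
          rw [runsOfB]]
        simp
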